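-- pv_equiv track=rewrite | github.com/akshithgara/Lexical-Analyzer | lex-analyzer/lexical_analyser.py | lex_helper_analyser
-- ===== SOURCE A (Python) =====
-- HEXA_DECIMAL = ['A','B','C','D','E','F']
--
-- PY_KEYWORDS = ['WHILE','ELSE','IF','END']
--
-- def lex_helper_analyser(s):
--     i = 0
--     state = 1
--     while i < len(s):
--         c = s[i]
--         if state == 1:
--             if c == '+' or c == '-':
--                 state = 2
--             elif c.isdigit():
--                 state = 3
--             elif c in HEXA_DECIMAL:
--                 state = 7
--             elif c == '(':
--                 state = 11
--             else:
--                 state = -1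
--         elif state == 2:
--             if c == '.':
--                 state = 4
--             elif c.isdigit():
--                 state = 3
--             else:
--                 state = -1
--         elif state == 3:
--             if c == '.':
--                 state = 4
--             elif c.isdigit():
--                 state = 3
--             elif c in HEXA_DECIMAL:
--                 state = 7
--             elif c == 'H':
--                 state = 8
--             else:
--                 state = -1
--         elif state == 4:
--             if c.isdigit():
--                 state = 5
--             else:
--                 state = -1
--         elif state == 5:
--             if c.isdigit():
--                 state = 5
--             elif c == 'E':
--                 state = 6
--             else:
--                 state = -1
--         elif state == 6:
--             if c.isdigit():
--                 state = 6
--             elif c == '-':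
--                 state = 6
--             else:
--                 state = -1
--         elif state == 7:
--             if c == 'H':
--                 state = 8
--             elif c.isdigit():
--                 state = 7
--             elif c in HEXA_DECIMAL:
--                 state = 7
--             else:
--                 state = -1
--         i += 1
--     if s in PY_KEYWORDS:
--         state = 9
--     if state == 3:
--         return 'Integer.'
--     elif state == 5:
--         return 'Decimal.'
--     elif state == 6:
--         return 'Scientific.'
--     elif state == 8:
--         return 'Hexadecimal.'
--     elif state == 9:
--         return 'Keyword.'
--     else:
--         return 'INVALID!'
-- ===== SOURCE B (Python) =====
-- HEXA_DECIMAL = ['A','B','C','D','E','F']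
--
-- PY_KEYWORDS = ['WHILE','ELSE','IF','END']
--
-- def _drop_digits(u):
--     if u and u[0].isdigit():
--         return _drop_digits(u[1:])
--     return u
--
-- def _drop_hexish(u):
--     if u and (u[0].isdigit() or u[0] in HEXA_DECIMAL):
--         return _drop_hexish(u[1:])
--     return u
--
-- def _sci_tail(u):
--     return all(c.isdigit() or c == '-' for c in u)
--
-- def _hex_tail(u):
--     # token is hexadecimal iff an 'H' follows a (possibly empty) run of hex characters
--     r = _drop_hexish(u)
--     return 'Hexadecimal.' if r[:1] == 'H' else 'INVALID!'
--
-- def _after_dot(u):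
--     # fraction part: one or more digits, optionally 'E' then any mix of digits and '-'
--     if not (u and u[0].isdigit()):
--         return 'INVALID!'
--     rest = _drop_digits(u)
--     if rest == '':
--         return 'Decimal.'
--     if rest[:1] == 'E' and _sci_tail(rest[1:]):
--         return 'Scientific.'
--     return 'INVALID!'
--
-- def lex_helper_analyser(s):
--     if s in PY_KEYWORDS:
--         return 'Keyword.'
--     signed = s[:1] in ('+', '-')
--     t = s[1:] if signed else s
--     if signed and t[:1] == '.':
--         return _after_dot(t[1:])
--     if t[:1].isdigit():
--         rest = _drop_digits(t)
--         if rest == '':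
--             return 'Integer.'
--         if rest[0] == '.':
--             return _after_dot(rest[1:])
--         return _hex_tail(rest)
--     if not signed and t[:1] and t[0] in HEXA_DECIMAL:
--         return _hex_tail(t)
--     return 'INVALID!'
-- ===== Notes on version B (the rewrite author's own statement) =====
-- stated objective: simpler
-- what changed: Replaces the 8-state DFA simulation (one big state-switch per character) with a direct recursive-descent classifier: strip an optional sign, split the token at the first non-digit / non-hex character, and decide Integer/Decimal/Scientific/Hexadecimal from the shape of the split pieces; no state variable at all.
import Mathlib
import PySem

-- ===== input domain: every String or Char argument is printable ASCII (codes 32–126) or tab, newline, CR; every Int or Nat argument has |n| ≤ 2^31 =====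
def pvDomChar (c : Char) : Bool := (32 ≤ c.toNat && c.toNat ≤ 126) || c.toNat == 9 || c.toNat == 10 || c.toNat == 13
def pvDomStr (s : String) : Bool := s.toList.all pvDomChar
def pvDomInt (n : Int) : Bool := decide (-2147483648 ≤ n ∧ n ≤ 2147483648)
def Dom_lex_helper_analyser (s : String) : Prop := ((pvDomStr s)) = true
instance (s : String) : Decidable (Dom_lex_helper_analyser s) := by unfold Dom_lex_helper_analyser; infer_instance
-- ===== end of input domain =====

-- B replaces A's per-character DFA state machine with a sign-strip + split-at-first-non-digit
-- recursive-descent classifier (objective: simpler).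

-- ===== PORT A =====
def pvHexa : List Char := ['A', 'B', 'C', 'D', 'E', 'F']
def pvKeywords : List String := ["WHILE", "ELSE", "IF", "END"]

-- the while loop of A: one transition per character, state carried along
def lexLoop : List Char → Int → Int
  | [], state => state
  | c :: rest, state =>
    let state' : Int :=
      if state = 1 then
        if c = '+' ∨ c = '-' then 2
        else if PySem.Chars.isdigit c then 3
        else if pvHexa.contains c then 7
        else if c = '(' then 11
        else -1
      else if state = 2 then
        if c = '.' then 4
        else if PySem.Chars.isdigit c then 3
        else -1
      else if state = 3 then
        if c = '.' then 4
        else if PySem.Chars.isdigit c then 3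
        else if pvHexa.contains c then 7
        else if c = 'H' then 8
        else -1
      else if state = 4 then
        if PySem.Chars.isdigit c then 5 else -1
      else if state = 5 then
        if PySem.Chars.isdigit c then 5
        else if c = 'E' then 6
        else -1
      else if state = 6 then
        if PySem.Chars.isdigit c then 6
        else if c = '-' then 6
        else -1
      else if state = 7 then
        if c = 'H' then 8
        else if PySem.Chars.isdigit c then 7
        else if pvHexa.contains c then 7
        else -1
      else state
    lexLoop rest state'

-- A's final if/elif chain on the state
def lexFinal (st : Int) : String :=
  if st = 3 then "Integer."
  else if st = 5 then "Decimal."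
  else if st = 6 then "Scientific."
  else if st = 8 then "Hexadecimal."
  else if st = 9 then "Keyword."
  else "INVALID!"

def lex_helper_analyser (s : String) : String :=
  lexFinal (if pvKeywords.contains s then 9 else lexLoop s.toList 1)

-- ===== PORT B =====
def dropDigitsB : List Char → List Char
  | [] => []
  | c :: cs => if PySem.Chars.isdigit c then dropDigitsB cs else c :: cs

def dropHexishB : List Char → List Char
  | [] => []
  | c :: cs =>
    if PySem.Chars.isdigit c || pvHexa.contains c then dropHexishB cs else c :: cs

def sciTailB (u : List Char) : Bool :=
  u.all (fun c => PySem.Chars.isdigit c || c == '-')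

-- token tail is hexadecimal iff an 'H' follows a (possibly empty) run of hex characters
def hexTailB (u : List Char) : String :=
  if (dropHexishB u).head? = some 'H' then "Hexadecimal." else "INVALID!"

def headDigitB : List Char → Bool
  | c :: _ => PySem.Chars.isdigit c
  | [] => false

def headHexB : List Char → Bool
  | c :: _ => pvHexa.contains c
  | [] => false

-- fraction part: one or more digits, optionally 'E' then any mix of digits and '-'
def afterDotB (u : List Char) : String :=
  if headDigitB u then
    let rest := dropDigitsB u
    if rest = [] then "Decimal."
    else if rest.head? = some 'E' ∧ sciTailB rest.tail then "Scientific."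
    else "INVALID!"
  else "INVALID!"

def signedB : List Char → Bool
  | c :: _ => c == '+' || c == '-'
  | [] => false

def bodyB (cs : List Char) : String :=
  let t := if signedB cs then cs.tail else cs
  if signedB cs && (t.head? == some '.') then afterDotB t.tail
  else if headDigitB t then
    let rest := dropDigitsB t
    if rest = [] then "Integer."
    else if rest.head? = some '.' then afterDotB rest.tail
    else hexTailB rest
  else if !signedB cs && headHexB t then hexTailB t
  else "INVALID!"

def lex_helper_analyser_alt (s : String) : String :=
  if pvKeywords.contains s then "Keyword." else bodyB s.toList

-- ===== PRECONDITION & SPEC =====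
def Spec_lex_helper_analyser (s : String) (out : String) : Prop := out = lex_helper_analyser_alt s
instance (s : String) (out : String) : Decidable (Spec_lex_helper_analyser s out) := by unfold Spec_lex_helper_analyser; infer_instance

-- ===== CLAIM (what is proved, stated in full; the proofs are below) =====
def Claim_equal_lex_helper_analyser : Prop := ∀ (s : String), Dom_lex_helper_analyser s → Spec_lex_helper_analyser s (lex_helper_analyser s)

-- ===== LEMMAS AND PROOFS =====

theorem run_neg1 (cs : List Char) : lexLoop cs (-1) = -1 := by
  induction cs with
  | nil => rfl
  | cons c cs ih => simp [lexLoop, ih]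

theorem run8 (cs : List Char) : lexLoop cs 8 = 8 := by
  induction cs with
  | nil => rfl
  | cons c cs ih => simp [lexLoop, ih]

theorem run11 (cs : List Char) : lexLoop cs 11 = 11 := by
  induction cs with
  | nil => rfl
  | cons c cs ih => simp [lexLoop, ih]

theorem run6 (cs : List Char) :
    lexLoop cs 6 = if sciTailB cs then 6 else -1 := by
  induction cs with
  | nil => rfl
  | cons c cs ih =>
    by_cases hd : PySem.Chars.isdigit c = true
    · simp [lexLoop, sciTailB, hd, ih]
    · by_cases hm : c = '-'
      · simp [lexLoop, sciTailB, hm, ih]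
      · simp [lexLoop, sciTailB, hd, hm, run_neg1]

theorem run5 (cs : List Char) :
    lexLoop cs 5 = (if dropDigitsB cs = [] then 5
      else if (dropDigitsB cs).head? = some 'E' ∧ sciTailB (dropDigitsB cs).tail then 6
      else -1) := by
  induction cs with
  | nil => rfl
  | cons c cs ih =>
    by_cases hd : PySem.Chars.isdigit c = true
    · simp [lexLoop, dropDigitsB, hd, ih]
    · by_cases he : c = 'E'
      · subst he
        simp [lexLoop, dropDigitsB, run6, show PySem.Chars.isdigit 'E' = false by decide]
      · simp [lexLoop, dropDigitsB, hd, he, run_neg1]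

theorem run7 (cs : List Char) :
    lexLoop cs 7 = (if (dropHexishB cs).head? = some 'H' then 8
                    else if dropHexishB cs = [] then 7 else -1) := by
  induction cs with
  | nil => rfl
  | cons c cs ih =>
    by_cases hH : c = 'H'
    · subst hH
      simp [lexLoop, dropHexishB, run8,
        show PySem.Chars.isdigit 'H' = false by decide,
        show ('H' ∈ pvHexa) = False by simp [pvHexa]]
    · by_cases hd : PySem.Chars.isdigit c = true
      · simp [lexLoop, dropHexishB, hH, hd, ih]
      · by_cases hl : c ∈ pvHexa
        · have hl' : pvHexa.contains c = true := by simpa using hl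
          simp [lexLoop, dropHexishB, hH, hd, hl, ih]
        · have hl' : pvHexa.contains c = false := by simpa using hl
          simp [lexLoop, dropHexishB, hH, hd, hl, run_neg1]

theorem run4S (u : List Char) : lexFinal (lexLoop u 4) = afterDotB u := by
  cases u with
  | nil => rfl
  | cons c cs =>
    by_cases hd : PySem.Chars.isdigit c = true
    · have h1 : lexLoop (c :: cs) 4 = lexLoop cs 5 := by simp [lexLoop, hd]
      have h2 : dropDigitsB (c :: cs) = dropDigitsB cs := by simp [dropDigitsB, hd]
      rw [h1, run5, afterDotB]
      simp only [headDigitB, hd, if_true, h2]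
      by_cases h3 : dropDigitsB cs = []
      · simp [h3, lexFinal]
      · by_cases h4 : (dropDigitsB cs).head? = some 'E' ∧ sciTailB (dropDigitsB cs).tail = true
        · simp [h3, h4.1, h4.2, lexFinal]
        · simp only [if_neg h3, if_neg h4]
          simp [lexFinal]
    · simp [lexLoop, afterDotB, headDigitB, hd, run_neg1, lexFinal]

theorem run7S (u : List Char) : lexFinal (lexLoop u 7) = hexTailB u := by
  rw [run7, hexTailB]
  by_cases h1 : (dropHexishB u).head? = some 'H'
  · simp [h1, lexFinal]
  · by_cases h2 : dropHexishB u = [] <;> simp [h1, h2, lexFinal]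

theorem hexTail_cons (c : Char) (tl : List Char)
    (h : PySem.Chars.isdigit c = true ∨ c ∈ pvHexa) :
    hexTailB (c :: tl) = hexTailB tl := by
  have h' : (PySem.Chars.isdigit c || pvHexa.contains c) = true := by
    rcases h with h | h <;> simp [h]
  unfold hexTailB
  have hstep : dropHexishB (c :: tl) = dropHexishB tl := by
    conv_lhs => rw [dropHexishB]
    rw [if_pos h']
  rw [hstep]

theorem run3S (u : List Char) :
    lexFinal (lexLoop u 3) =
      (if dropDigitsB u = [] then "Integer."
       else if (dropDigitsB u).head? = some '.' then afterDotB (dropDigitsB u).tail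
       else hexTailB (dropDigitsB u)) := by
  induction u with
  | nil => rfl
  | cons c cs ih =>
    by_cases hp : c = '.'
    · subst hp
      have h1 : lexLoop ('.' :: cs) 3 = lexLoop cs 4 := by
        simp [lexLoop]
      have h2 : dropDigitsB ('.' :: cs) = '.' :: cs := by
        simp [dropDigitsB, show PySem.Chars.isdigit '.' = false by decide]
      rw [h1, run4S, h2, if_neg (by simp), if_pos (by simp), List.tail_cons]
    · by_cases hd : PySem.Chars.isdigit c = true
      · rw [show lexLoop (c :: cs) 3 = lexLoop cs 3 by simp [lexLoop, hp, hd], ih,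
          show dropDigitsB (c :: cs) = dropDigitsB cs by simp [dropDigitsB, hd]]
      · have hdd : dropDigitsB (c :: cs) = c :: cs := by simp [dropDigitsB, hd]
        by_cases hl : c ∈ pvHexa
        · have hl' : pvHexa.contains c = true := by simpa using hl
          rw [show lexLoop (c :: cs) 3 = lexLoop cs 7 by simp [lexLoop, hp, hd, hl], run7S, hdd]
          rw [if_neg (by simp), if_neg (by simp [hp])]
          exact (hexTail_cons c cs (Or.inr hl)).symm
        · have hl' : pvHexa.contains c = false := by simpa using hl
          by_cases hH : c = 'H'
          · subst hH
            rw [show lexLoop ('H' :: cs) 3 = lexLoop cs 8 by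
                simp [lexLoop, show PySem.Chars.isdigit 'H' = false by decide,
                  show ('H' ∈ pvHexa) = False by simp [pvHexa]],
              run8, hdd]
            rw [if_neg (by simp), if_neg (by simp)]
            simp [lexFinal, hexTailB, dropHexishB,
              show PySem.Chars.isdigit 'H' = false by decide,
              show ('H' ∈ pvHexa) = False by simp [pvHexa]]
          · rw [show lexLoop (c :: cs) 3 = lexLoop cs (-1) by simp [lexLoop, hp, hd, hl, hH],
              run_neg1, hdd]
            rw [if_neg (by simp), if_neg (by simp [hp])]
            simp [lexFinal, hexTailB, dropHexishB, hd, hl, hH]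

theorem mainBody (cs : List Char) : lexFinal (lexLoop cs 1) = bodyB cs := by
  cases cs with
  | nil => rfl
  | cons c t =>
    by_cases hs : (c == '+' || c == '-') = true
    · have hs' : c = '+' ∨ c = '-' := by simpa using hs
      have h1 : lexLoop (c :: t) 1 = lexLoop t 2 := by
        rcases hs' with h | h <;> subst h <;> simp [lexLoop]
      have hsg : signedB (c :: t) = true := by simp [signedB, hs]
      rw [h1]
      cases t with
      | nil => simp [lexLoop, bodyB, hsg, headDigitB, headHexB, lexFinal]
      | cons d u =>
        by_cases hdot : d = '.'
        · subst hdot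
          have : lexLoop ('.' :: u) 2 = lexLoop u 4 := by
            simp [lexLoop]
          rw [this, run4S]
          simp [bodyB, hsg]
        · by_cases hd : PySem.Chars.isdigit d = true
          · have : lexLoop (d :: u) 2 = lexLoop u 3 := by simp [lexLoop, hdot, hd]
            rw [this, run3S]
            simp [bodyB, hsg, hdot, headDigitB, hd,
              show dropDigitsB (d :: u) = dropDigitsB u by simp [dropDigitsB, hd]]
          · have : lexLoop (d :: u) 2 = lexLoop u (-1) := by simp [lexLoop, hdot, hd]
            rw [this, run_neg1]
            simp [bodyB, hsg, hdot, headDigitB, hd, lexFinal]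
    · have hsg : signedB (c :: t) = false := by simp [signedB] at hs ⊢; tauto
      have hne : ¬(c = '+' ∨ c = '-') := by simpa using hs
      by_cases hd : PySem.Chars.isdigit c = true
      · have : lexLoop (c :: t) 1 = lexLoop t 3 := by simp [lexLoop, hne, hd]
        rw [this, run3S]
        simp [bodyB, hsg, headDigitB, hd,
          show dropDigitsB (c :: t) = dropDigitsB t by simp [dropDigitsB, hd]]
      · by_cases hl : c ∈ pvHexa
        · have hl' : pvHexa.contains c = true := by simpa using hl
          have : lexLoop (c :: t) 1 = lexLoop t 7 := by simp [lexLoop, hne, hd, hl]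
          rw [this, run7S]
          rw [← hexTail_cons c t (Or.inr hl)]
          simp [bodyB, hsg, headDigitB, headHexB, hd, hl]
        · have hl' : pvHexa.contains c = false := by simpa using hl
          by_cases hpar : c = '('
          · subst hpar
            have : lexLoop ('(' :: t) 1 = lexLoop t 11 := by
              simp [lexLoop, hd, hl]
            rw [this, run11]
            simp [bodyB, hsg, headDigitB, headHexB, hd, hl, lexFinal]
          · have : lexLoop (c :: t) 1 = lexLoop t (-1) := by
              simp [lexLoop, hne, hd, hl, hpar]
            rw [this, run_neg1]
            simp [bodyB, hsg, headDigitB, headHexB, hd, hl, lexFinal]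

-- ===== VERDICT (by name: the statement is the Claim_ definition above) =====
theorem lex_helper_analyser_spec : Claim_equal_lex_helper_analyser := by
  intro s _
  unfold Spec_lex_helper_analyser lex_helper_analyser lex_helper_analyser_alt
  by_cases hk : s ∈ pvKeywords
  · norm_num [lexFinal, hk]
  · simp [hk, mainBody]
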